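-- pv_equiv track=rewrite | github.com/Pulvert/phyton | retos_programacion-mouredeb/ejercicios_lógicos/23_conjuntos.py | filtrar_elementos
-- ===== SOURCE A (Python) =====
-- def filtrar_elementos(array1, array2, comunes):
--     resultado = []
--
--     if comunes:
--         # Buscar elementos comunes
--         for elemento in array1:
--             if elemento in array2 and elemento not in resultado:
--                 resultado.append(elemento)
--         # También buscar en array2 para los elementos no duplicados de array1
--         for elemento in array2:
--             if elemento in array1 and elemento not in resultado:
--                 resultado.append(elemento)
--     else:
--         # Buscar elementos no comunes
--         for elemento in array1:
--             if elemento not in array2 and elemento not in resultado: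
--                 resultado.append(elemento)
--         for elemento in array2:
--             if elemento not in array1 and elemento not in resultado:
--                 resultado.append(elemento)
--
--     return resultado
-- ===== SOURCE B (Python) =====
-- def filtrar_elementos(array1, array2, comunes):
--     # Index each distinct value by its first-occurrence position across array1 then array2,
--     # then sort the selected set (intersection or symmetric difference) by that position.
--     first = {}
--     for i, x in enumerate(array1 + array2):
--         if x not in first:
--             first[x] = i
--     set1, set2 = set(array1), set(array2)
--     seleccion = set1 & set2 if comunes else set1 ^ set2
--     return sorted(seleccion, key=first.__getitem__)
-- ===== Notes on version B (the rewrite author's own statement) =====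
-- stated objective: faster
-- what changed: Instead of A's four quadratic output-building scans, B indexes each distinct value by its first-occurrence position in a dict, computes the selected set (intersection or symmetric difference), and produces the result by SORTING that set by first-occurrence index.
import Mathlib
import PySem

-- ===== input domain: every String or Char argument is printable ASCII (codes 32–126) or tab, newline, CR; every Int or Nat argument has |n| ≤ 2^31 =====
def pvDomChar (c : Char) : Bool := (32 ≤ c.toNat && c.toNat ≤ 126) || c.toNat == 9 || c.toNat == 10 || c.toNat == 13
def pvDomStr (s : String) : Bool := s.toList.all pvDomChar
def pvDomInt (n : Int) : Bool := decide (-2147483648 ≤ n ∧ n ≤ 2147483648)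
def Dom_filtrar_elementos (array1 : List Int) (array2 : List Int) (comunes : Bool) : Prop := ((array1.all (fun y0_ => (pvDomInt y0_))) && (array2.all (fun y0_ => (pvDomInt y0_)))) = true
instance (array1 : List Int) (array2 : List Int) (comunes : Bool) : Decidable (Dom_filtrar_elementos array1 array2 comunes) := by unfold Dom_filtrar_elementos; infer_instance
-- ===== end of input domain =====

-- B replaces A's four output-building scans by indexing first-occurrence positions in a dict
-- and sorting the selected set (intersection or symmetric difference) by that position.

-- ===== PORT A =====
def filtrar_elementos (array1 : List Int) (array2 : List Int) (comunes : Bool) : List Int :=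
  if comunes then
    let r1 := array1.foldl (fun resultado elemento =>
      if array2.contains elemento && !(resultado.contains elemento) then resultado ++ [elemento] else resultado) []
    array2.foldl (fun resultado elemento =>
      if array1.contains elemento && !(resultado.contains elemento) then resultado ++ [elemento] else resultado) r1
  else
    let r1 := array1.foldl (fun resultado elemento =>
      if !(array2.contains elemento) && !(resultado.contains elemento) then resultado ++ [elemento] else resultado) []
    array2.foldl (fun resultado elemento =>
      if !(array1.contains elemento) && !(resultado.contains elemento) then resultado ++ [elemento] else resultado) r1


-- ===== PORT B =====
-- 'sorted(seleccion, key=first.__getitem__)': the key lookup never raises (every selected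
-- element occurs in array1 ++ array2, so it is in 'first'), ported as get? + getD 0.
def filtrar_elementos_alt (array1 : List Int) (array2 : List Int) (comunes : Bool) : List Int :=
  let first := (PySem.List.enumerate (array1 ++ array2) 0).foldl
      (fun d p => if d.contains p.2 then d else d.insert p.2 p.1)
      (PySem.Dict.empty : PySem.Dict Int Int)
  let set1 := PySem.Set.ofList array1
  let set2 := PySem.Set.ofList array2
  let seleccion := if comunes then PySem.Set.inter set1 set2 else PySem.Set.symmDiff set1 set2
  PySem.List.sorted seleccion (fun x => (first.get? x).getD 0) false

-- ===== PRECONDITION & SPEC =====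
def Spec_filtrar_elementos (array1 : List Int) (array2 : List Int) (comunes : Bool) (out : List Int) : Prop := out = filtrar_elementos_alt array1 array2 comunes
instance (array1 : List Int) (array2 : List Int) (comunes : Bool) (out : List Int) : Decidable (Spec_filtrar_elementos array1 array2 comunes out) := by unfold Spec_filtrar_elementos; infer_instance

-- ===== CLAIM (what is proved, stated in full; the proofs are below) =====
def Claim_equal_filtrar_elementos : Prop := ∀ (array1 : List Int) (array2 : List Int) (comunes : Bool), Dom_filtrar_elementos array1 array2 comunes → Spec_filtrar_elementos array1 array2 comunes (filtrar_elementos array1 array2 comunes)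

-- ===== LEMMAS AND PROOFS =====

-- Intermediate characterisation of A's result: the selected elements of array1 ++ array2,
-- deduplicated, in first-occurrence order.
def midB (array1 : List Int) (array2 : List Int) (comunes : Bool) : List Int :=
  let set1 := PySem.Set.ofList array1
  let set2 := PySem.Set.ofList array2
  let seleccion := if comunes then PySem.Set.inter set1 set2 else PySem.Set.symmDiff set1 set2
  (PySem.List.dedup (array1 ++ array2)).filter (fun x => PySem.Set.contains seleccion x)

def dedupA (avoid : List Int) : List Int → List Int
  | [] => []
  | e :: l => if avoid.contains e then dedupA avoid l else e :: dedupA (avoid ++ [e]) l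

theorem mem_dedupA (x : Int) : ∀ (l avoid : List Int),
    x ∈ dedupA avoid l ↔ x ∈ l ∧ x ∉ avoid := by
  intro l
  induction l with
  | nil => intro avoid; simp [dedupA]
  | cons e l ih =>
    intro avoid
    by_cases he : e ∈ avoid
    · simp [dedupA, he, ih]
      intro h1 h2; subst h2; exact absurd he h1
    · simp [dedupA, he, ih]
      constructor <;> intro h
      · rcases h with rfl | ⟨hx, h1, h2⟩
        · exact ⟨Or.inl rfl, he⟩
        · exact ⟨Or.inr hx, h1⟩
      · rcases h with ⟨rfl | hx, hc⟩
        · exact Or.inl rfl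
        · by_cases hxe : x = e
          · exact Or.inl hxe
          · exact Or.inr ⟨hx, hc, hxe⟩

theorem filter_dedupA (p : Int → Bool) : ∀ (l avoid : List Int),
    (dedupA avoid l).filter p = dedupA (avoid.filter p) (l.filter p) := by
  intro l
  induction l with
  | nil => intro avoid; simp [dedupA]
  | cons e l ih =>
    intro avoid
    have hmem : ∀ (a : List Int), p e = true → (e ∈ a.filter p ↔ e ∈ a) := by
      intro a hp; simp [List.mem_filter, hp]
    by_cases he : e ∈ avoid <;> by_cases hp : p e
    · simp [dedupA, he, (hmem avoid hp).mpr he, hp, ih]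
    · simp [dedupA, he, hp, ih]
    · have : e ∉ avoid.filter p := fun hc => he ((hmem avoid hp).mp hc)
      simp [dedupA, he, this, hp, ih, List.filter_append]
    · have : (dedupA (avoid ++ [e]) l).filter p = dedupA (avoid.filter p) (l.filter p) := by
        rw [ih, List.filter_append]
        simp [hp]
      simp [dedupA, he, hp, this]

def ins (p : Int → Bool) (r : List Int) (l : List Int) : List Int :=
  l.foldl (fun resultado elemento =>
    if p elemento && !(resultado.contains elemento) then resultado ++ [elemento] else resultado) r

theorem ins_eq (p : Int → Bool) : ∀ (l r : List Int),
    ins p r l = r ++ (dedupA r l).filter p := by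
  intro l
  induction l with
  | nil => intro r; simp [ins, dedupA]
  | cons e l ih =>
    intro r
    by_cases hre : e ∈ r
    · have hstep : ins p r (e :: l) = ins p r l := by
        simp [ins, List.foldl_cons, hre]
      rw [hstep, ih]
      simp [dedupA, hre]
    · by_cases hp : p e
      · have hstep : ins p r (e :: l) = ins p (r ++ [e]) l := by
          simp [ins, List.foldl_cons, hre, hp]
        rw [hstep, ih]
        simp [dedupA, hre, hp]
      · have hstep : ins p r (e :: l) = ins p r l := by
          simp [ins, List.foldl_cons, hre, hp]
        rw [hstep, ih]
        rw [filter_dedupA, filter_dedupA]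
        simp [hp]

theorem dedupA_append : ∀ (l1 l2 avoid : List Int),
    dedupA avoid (l1 ++ l2) = dedupA avoid l1 ++ dedupA (avoid ++ dedupA avoid l1) l2 := by
  intro l1
  induction l1 with
  | nil => intro l2 avoid; simp [dedupA]
  | cons e l ih =>
    intro l2 avoid
    by_cases he : e ∈ avoid
    · simp [dedupA, he, ih]
    · simp [dedupA, he, ih, List.append_assoc]

theorem dedupA_congr : ∀ (l avoid1 avoid2 : List Int),
    (∀ x ∈ l, x ∈ avoid1 ↔ x ∈ avoid2) →
    dedupA avoid1 l = dedupA avoid2 l := by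
  intro l
  induction l with
  | nil => intro _ _ _; simp [dedupA]
  | cons e l ih =>
    intro avoid1 avoid2 h
    have he : e ∈ avoid1 ↔ e ∈ avoid2 := h e (List.mem_cons_self ..)
    by_cases h1 : e ∈ avoid1
    · simp [dedupA, h1, he.mp h1]
      exact ih _ _ (fun x hx => h x (List.mem_cons_of_mem _ hx))
    · have h2 : e ∉ avoid2 := fun hc => h1 (he.mpr hc)
      simp [dedupA, h1, h2]
      exact ih _ _ (fun x hx => by
        simp only [List.mem_append, List.mem_singleton]
        rw [h x (List.mem_cons_of_mem _ hx)])

theorem ofList_eq_dedupA : ∀ (l : List Int), PySem.Set.ofList l = dedupA [] l := by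
  have key : ∀ (l s : List Int), l.foldl PySem.Set.add s = ins (fun _ => true) s l := by
    intro l s
    unfold ins
    congr 1
    funext r e
    by_cases h : r.contains e <;> simp [PySem.Set.add, PySem.Set.contains]
  intro l
  rw [PySem.Set.ofList_eq_foldl, key, ins_eq]
  simp

theorem filtrar_eq_mid (a1 a2 : List Int) (c : Bool) :
    filtrar_elementos a1 a2 c = midB a1 a2 c := by
  have hd1 : ∀ x, x ∈ dedupA [] a1 ↔ x ∈ a1 := by intro x; simp [mem_dedupA]
  have hdedup : PySem.List.dedup (a1 ++ a2) = dedupA [] a1 ++ dedupA (dedupA [] a1) a2 := by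
    rw [PySem.List.dedup_eq_ofList, ofList_eq_dedupA, dedupA_append]; simp
  cases c
  · -- comunes = False : symmetric difference
    have hp : ∀ x, (PySem.Set.contains
        (PySem.Set.symmDiff (PySem.Set.ofList a1) (PySem.Set.ofList a2)) x = true) ↔
        ((x ∈ a1 ∧ x ∉ a2) ∨ (x ∈ a2 ∧ x ∉ a1)) := by
      intro x
      rw [PySem.Set.contains_iff, PySem.Set.mem_symmDiff]
      simp [PySem.Set.mem_ofList]
    simp only [filtrar_elementos, midB, Bool.false_eq_true, if_false]
    show ins (fun e => !(a1.contains e)) (ins (fun e => !(a2.contains e)) [] a1) a2 = _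
    rw [ins_eq, ins_eq, hdedup]
    rw [List.nil_append, List.filter_append]
    have e1 : List.filter (fun x => ((PySem.Set.ofList a1).symmDiff (PySem.Set.ofList a2)).contains x) (dedupA [] a1)
        = List.filter (fun e => !a2.contains e) (dedupA [] a1) := by
      apply List.filter_congr
      intro x hx
      have hx1 : x ∈ a1 := (hd1 x).mp hx
      rw [Bool.eq_iff_iff, hp x]
      simp [hx1]
    have e2a : List.filter (fun x => ((PySem.Set.ofList a1).symmDiff (PySem.Set.ofList a2)).contains x) (dedupA (dedupA [] a1) a2)
        = List.filter (fun e => !a1.contains e) (dedupA (dedupA [] a1) a2) := by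
      apply List.filter_congr
      intro x hx
      have hx2 : x ∈ a2 := ((mem_dedupA x a2 _).mp hx).1
      rw [Bool.eq_iff_iff, hp x]
      simp [hx2]
    have e2b : List.filter (fun e => !a1.contains e) (dedupA (dedupA [] a1) a2)
        = List.filter (fun e => !a1.contains e) (dedupA (List.filter (fun e => !a2.contains e) (dedupA [] a1)) a2) := by
      rw [filter_dedupA (fun e => !a1.contains e) a2 (dedupA [] a1),
        filter_dedupA (fun e => !a1.contains e) a2 (List.filter (fun e => !a2.contains e) (dedupA [] a1))]
      apply dedupA_congr
      intro x hx
      have hx2 : x ∉ a1 := by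
        rcases List.mem_filter.mp hx with ⟨_, h⟩
        simpa using h
      simp only [List.mem_filter]
      constructor
      · rintro ⟨hxd, _⟩; exact absurd ((hd1 x).mp hxd) hx2
      · rintro ⟨⟨hxd, _⟩, _⟩; exact absurd ((hd1 x).mp hxd) hx2
    rw [e1, e2a, e2b]
  · -- comunes = True : intersection
    have hp : ∀ x, (PySem.Set.contains
        (PySem.Set.inter (PySem.Set.ofList a1) (PySem.Set.ofList a2)) x = true) ↔
        (x ∈ a1 ∧ x ∈ a2) := by
      intro x
      rw [PySem.Set.contains_iff, PySem.Set.mem_inter]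
      simp [PySem.Set.mem_ofList]
    simp only [filtrar_elementos, midB, if_true]
    show ins (fun e => a1.contains e) (ins (fun e => a2.contains e) [] a1) a2 = _
    rw [ins_eq, ins_eq, hdedup]
    rw [List.nil_append, List.filter_append]
    have e1 : List.filter (fun x => ((PySem.Set.ofList a1).inter (PySem.Set.ofList a2)).contains x) (dedupA [] a1)
        = List.filter (fun e => a2.contains e) (dedupA [] a1) := by
      apply List.filter_congr
      intro x hx
      have hx1 : x ∈ a1 := (hd1 x).mp hx
      rw [Bool.eq_iff_iff, hp x]
      simp [hx1]
    have e2a : List.filter (fun x => ((PySem.Set.ofList a1).inter (PySem.Set.ofList a2)).contains x) (dedupA (dedupA [] a1) a2)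
        = List.filter (fun e => a1.contains e) (dedupA (dedupA [] a1) a2) := by
      apply List.filter_congr
      intro x hx
      have hx2 : x ∈ a2 := ((mem_dedupA x a2 _).mp hx).1
      rw [Bool.eq_iff_iff, hp x]
      simp [hx2]
    have e2b : List.filter (fun e => a1.contains e) (dedupA (dedupA [] a1) a2)
        = List.filter (fun e => a1.contains e) (dedupA (List.filter (fun e => a2.contains e) (dedupA [] a1)) a2) := by
      rw [filter_dedupA (fun e => a1.contains e) a2 (dedupA [] a1),
        filter_dedupA (fun e => a1.contains e) a2 (List.filter (fun e => a2.contains e) (dedupA [] a1))]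
      apply dedupA_congr
      intro x hx
      rcases List.mem_filter.mp hx with ⟨hxa2, hxc⟩
      have hx1 : x ∈ a1 := by simpa using hxc
      have hx2 : x ∈ a2 := hxa2
      simp only [List.mem_filter, hd1]
      simp [hx1, hx2]
    rw [e1, e2a, e2b]

-- Lookup in the first-occurrence dict built by B's loop.
theorem get?_firstFold (x : Int) : ∀ (l : List Int) (s : Int) (d : PySem.Dict Int Int),
    ((PySem.List.enumerate l s).foldl
        (fun d p => if d.contains p.2 then d else d.insert p.2 p.1) d).get? x
      = (d.get? x).or (if x ∈ l then some (s + (List.idxOf x l : Int)) else none) := by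
  intro l
  induction l with
  | nil => intro s d; simp [PySem.List.enumerate]
  | cons e l ih =>
    intro s d
    rw [PySem.List.enumerate_cons, List.foldl_cons]
    by_cases hxe : x = e
    · subst hxe
      by_cases hc : d.contains x
      · have hsome : (d.get? x).isSome := by rw [← PySem.Dict.contains_eq_isSome_get?]; exact hc
        obtain ⟨v, hv⟩ := Option.isSome_iff_exists.mp hsome
        simp only [hc, if_true, ih, hv, Option.or]
      · have hnone : d.get? x = none := by
          rw [Option.eq_none_iff_forall_ne_some]
          intro v hv
          have : (d.get? x).isSome := by simp [hv]
          rw [← PySem.Dict.contains_eq_isSome_get?] at this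
          simp [hc] at this
        simp only [Bool.not_eq_true] at hc
        simp only [hc, Bool.false_eq_true, if_false, ih,
          PySem.Dict.get?_insert_self, hnone, List.mem_cons, true_or, if_true,
          List.idxOf_cons_self, Option.or_some]
        simp
    · have hd' : (if d.contains e then d else d.insert e s).get? x = d.get? x := by
        by_cases hc : d.contains e <;> simp [hc, PySem.Dict.get?_insert_of_ne d s hxe]
      rw [ih, hd']
      by_cases hl : x ∈ l
      · have hidx : List.idxOf x (e :: l) = List.idxOf x l + 1 :=
          List.idxOf_cons_ne l (fun h => hxe h.symm)
        simp only [hl, if_true, List.mem_cons, hxe, false_or, hidx]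
        congr 2
        push_cast
        omega
      · simp [hl, hxe]

-- The elements of set(l) are pairwise increasing in first-occurrence index.
theorem pairwise_idxOf_ofList : ∀ (l : List Int),
    (PySem.Set.ofList l).Pairwise (fun a b => List.idxOf a l < List.idxOf b l) := by
  intro l
  induction l using List.reverseRecOn with
  | nil => simp [PySem.Set.ofList]
  | append_singleton l x ih =>
    rw [PySem.Set.ofList_append_singleton]
    by_cases hx : x ∈ l
    · rw [PySem.Set.add_of_mem ((PySem.Set.mem_ofList _ _).mpr hx)]
      refine ih.imp_of_mem ?_
      intro a b ha hb hab
      have ha' : a ∈ l := (PySem.Set.mem_ofList _ _).mp ha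
      have hb' : b ∈ l := (PySem.Set.mem_ofList _ _).mp hb
      rwa [List.idxOf_append_of_mem ha', List.idxOf_append_of_mem hb']
    · rw [PySem.Set.add_of_not_mem (fun h => hx ((PySem.Set.mem_ofList _ _).mp h))]
      rw [List.pairwise_append]
      refine ⟨ih.imp_of_mem ?_, List.pairwise_singleton .., ?_⟩
      · intro a b ha hb hab
        have ha' : a ∈ l := (PySem.Set.mem_ofList _ _).mp ha
        have hb' : b ∈ l := (PySem.Set.mem_ofList _ _).mp hb
        rwa [List.idxOf_append_of_mem ha', List.idxOf_append_of_mem hb']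
      · intro a ha b hb
        rw [List.mem_singleton] at hb
        subst hb
        have ha' : a ∈ l := (PySem.Set.mem_ofList _ _).mp ha
        rw [List.idxOf_append_of_mem ha', List.idxOf_append_of_notMem hx]
        have h1 : List.idxOf a l < l.length := List.idxOf_lt_length_of_mem ha'
        simp only [List.idxOf_cons_self]
        omega

theorem mid_eq_alt (a1 a2 : List Int) (c : Bool) :
    midB a1 a2 c = filtrar_elementos_alt a1 a2 c := by
  simp only [midB, filtrar_elementos_alt]
  set l := a1 ++ a2 with hl
  set sel := (if c then PySem.Set.inter (PySem.Set.ofList a1) (PySem.Set.ofList a2)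
    else PySem.Set.symmDiff (PySem.Set.ofList a1) (PySem.Set.ofList a2)) with hsel
  set key : Int → Int := fun x =>
    (((PySem.List.enumerate l 0).foldl
        (fun d p => if d.contains p.2 then d else d.insert p.2 p.1)
        (PySem.Dict.empty : PySem.Dict Int Int)).get? x).getD 0 with hkey
  -- the key of an element of l is its first-occurrence index
  have hkeyval : ∀ x ∈ l, key x = (List.idxOf x l : Int) := by
    intro x hxl
    rw [hkey]
    simp only [get?_firstFold, PySem.Dict.get?_empty, Option.or, hxl, if_true]
    simp
  have hselmem : ∀ x, x ∈ sel → x ∈ l := by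
    intro x hx
    rw [hsel] at hx
    rw [hl]
    cases c <;> simp only [if_true, Bool.false_eq_true, if_false] at hx
    · rcases (PySem.Set.mem_symmDiff _ _ _).mp hx with ⟨h, _⟩ | ⟨h, _⟩ <;>
        simp [PySem.Set.mem_ofList _ _ |>.mp h]
    · rcases (PySem.Set.mem_inter _ _ _).mp hx with ⟨h, _⟩
      simp [PySem.Set.mem_ofList _ _ |>.mp h]
  have hselnodup : sel.Nodup := by
    rw [hsel]
    cases c <;> simp only [if_true, Bool.false_eq_true, if_false]
    · exact PySem.Set.nodup_symmDiff _ _ (PySem.Set.nodup_ofList a1) (PySem.Set.nodup_ofList a2)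
    · exact PySem.Set.nodup_inter _ _ (PySem.Set.nodup_ofList a1)
  have hperm : ((PySem.List.dedup l).filter (fun x => PySem.Set.contains sel x)).Perm sel := by
    refine (List.perm_ext_iff_of_nodup ((PySem.List.nodup_dedup l).filter _) hselnodup).mpr ?_
    intro a
    rw [List.mem_filter, PySem.List.mem_dedup, PySem.Set.contains_iff sel a]
    constructor
    · exact fun ⟨_, h⟩ => h
    · exact fun h => ⟨hselmem a h, h⟩
  have hpair : ((PySem.List.dedup l).filter (fun x => PySem.Set.contains sel x)).Pairwise
      (fun a b => key a < key b) := by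
    refine List.Pairwise.filter _ ?_
    rw [PySem.List.dedup_eq_ofList]
    refine (pairwise_idxOf_ofList l).imp_of_mem ?_
    intro a b ha hb hab
    have ha' : a ∈ l := (PySem.Set.mem_ofList _ _).mp ha
    have hb' : b ∈ l := (PySem.Set.mem_ofList _ _).mp hb
    rw [hkeyval a ha', hkeyval b hb']
    exact_mod_cast hab
  exact (PySem.List.sorted_eq_of_perm_of_pairwise_lt sel _ key hperm hpair).symm

-- ===== VERDICT (by name: the statement is the Claim_ definition above) =====
theorem filtrar_elementos_spec : Claim_equal_filtrar_elementos := by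
  intro array1 array2 comunes _
  exact ((filtrar_eq_mid array1 array2 comunes).trans (mid_eq_alt array1 array2 comunes)).symm ▸ rfl
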